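-- pv_equiv track=rewrite | github.com/Paul513607/Python-Laboratory | Laboratory1/main.py | get_most_common_letter
-- ===== SOURCE A (Python) =====
-- def get_most_common_letter(string):
--     dict = {}
--     string = string.lower()
--     alphabet = 'abcdefghijklmnopqrstuvwxyz'
--     for ch in alphabet:
--         dict[ch] = 0
--
--     for letter in string:
--         if letter in alphabet:
--             dict[letter] += 1
--
--     max_key = ''
--     max_val = -1
--     for (key, value) in dict.items():
--         if value > max_val:
--             max_key = key
--             max_val = value
--     return max_key
-- ===== SOURCE B (Python) =====
-- def get_most_common_letter(string):
--     s = string.lower()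
--     max_key = ''
--     max_val = -1
--     for letter in 'abcdefghijklmnopqrstuvwxyz':
--         n = sum(1 for c in s if c == letter)
--         if n > max_val:
--             max_key = letter
--             max_val = n
--     return max_key
-- ===== Notes on version B (the rewrite author's own statement) =====
-- stated objective: alternative
-- what changed: B drops A's 26-key frequency dict and its items scan: it loops over the alphabet directly, counting each letter's occurrences in the lowered string with a generator sum, keeping the running maximum with the same seed and strict comparison so ties favor the earliest letter.
import Mathlib
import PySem

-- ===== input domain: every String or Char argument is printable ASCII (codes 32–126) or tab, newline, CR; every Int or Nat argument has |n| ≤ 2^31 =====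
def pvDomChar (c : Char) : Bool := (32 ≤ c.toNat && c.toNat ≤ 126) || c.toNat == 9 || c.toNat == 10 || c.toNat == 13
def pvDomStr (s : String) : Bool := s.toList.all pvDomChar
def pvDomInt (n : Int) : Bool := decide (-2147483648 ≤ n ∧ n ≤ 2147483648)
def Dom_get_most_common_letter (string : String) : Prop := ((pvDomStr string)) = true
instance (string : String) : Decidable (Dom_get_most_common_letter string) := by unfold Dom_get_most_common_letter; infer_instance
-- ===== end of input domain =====

-- B replaces A's 26-key frequency dict and its items scan by a direct loop over the alphabet
-- that counts each letter in the lowered string, keeping the running max (alternative decomposition).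

def pvAlphabet : List Char := "abcdefghijklmnopqrstuvwxyz".toList

-- ===== PORT A =====
def get_most_common_letter (string : String) : String :=
  let d : PySem.Dict Char Int :=
    pvAlphabet.foldl (fun d ch => d.insert ch 0) PySem.Dict.empty
  let s := PySem.Str.lower string
  let d :=
    s.toList.foldl (fun d letter =>
      if PySem.Chars.isIn [letter] pvAlphabet then d.modify letter 0 (· + 1) else d) d
  let r := d.items.foldl (fun (acc : String × Int) kv =>
      if kv.2 > acc.2 then (String.ofList [kv.1], kv.2) else acc) ("", -1)
  r.1

-- ===== PORT B =====
def get_most_common_letter_alt (string : String) : String :=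
  let s := PySem.Str.lower string
  let r := pvAlphabet.foldl (fun (acc : String × Int) letter =>
      let n : Int := s.toList.foldl (fun k c => if c == letter then k + 1 else k) 0
      if n > acc.2 then (String.ofList [letter], n) else acc) ("", -1)
  r.1

-- ===== PRECONDITION & SPEC =====
def Spec_get_most_common_letter (string : String) (out : String) : Prop := out = get_most_common_letter_alt string
instance (string : String) (out : String) : Decidable (Spec_get_most_common_letter string out) := by unfold Spec_get_most_common_letter; infer_instance

-- ===== CLAIM (what is proved, stated in full; the proofs are below) =====
def Claim_equal_get_most_common_letter : Prop := ∀ (string : String), Dom_get_most_common_letter string → Spec_get_most_common_letter string (get_most_common_letter string)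

-- ===== LEMMAS AND PROOFS =====

lemma pv_isIn_singleton (c : Char) (l : List Char) :
    PySem.Chars.isIn [c] l = true ↔ c ∈ l := by
  rw [PySem.Chars.isIn_iff_infix]; exact List.singleton_infix_iff c l

lemma pv_items_eq_keys_map (d : PySem.Dict Char Int) (h : d.keys.Nodup) :
    d.items = d.keys.map (fun k => (k, d.getD k 0)) := by
  apply List.ext_getElem
  · simp [PySem.Dict.keys]
  · intro i h1 h2
    have hkeys : d.keys = d.items.map (·.1) := rfl
    have hm : (d.items[i].1, d.items[i].2) ∈ d.items := by simp
    have hv := PySem.Dict.getD_of_get?_eq_some d 0 (PySem.Dict.get?_of_mem_items d hm h)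
    simp [hkeys, hv]

lemma pv_keys_inv (l : List Char) (d : PySem.Dict Char Int) (hk : d.keys = pvAlphabet) :
    (l.foldl (fun d letter =>
      if PySem.Chars.isIn [letter] pvAlphabet then d.modify letter 0 (· + 1) else d) d).keys
      = pvAlphabet := by
  induction l generalizing d with
  | nil => simpa using hk
  | cons c l ih =>
    simp only [List.foldl_cons]
    split
    · apply ih
      rename_i hin
      rw [PySem.Dict.keys_modify, PySem.Dict.keys_insert_of_contains]
      · exact hk
      · rw [PySem.Dict.contains_iff_mem_keys, hk]
        exact (pv_isIn_singleton c pvAlphabet).mp hin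
    · exact ih d hk

lemma pv_getD_inv (l : List Char) (d : PySem.Dict Char Int) (k : Char) (hk : k ∈ pvAlphabet) :
    (l.foldl (fun d letter =>
      if PySem.Chars.isIn [letter] pvAlphabet then d.modify letter 0 (· + 1) else d) d).getD k 0
      = d.getD k 0 + l.count k := by
  induction l generalizing d with
  | nil => simp
  | cons c l ih =>
    simp only [List.foldl_cons, List.count_cons]
    split
    · rw [ih]
      rw [PySem.Dict.getD_modify]
      by_cases hck : k = c
      case pos => simp [hck]; omega
      case neg => simp [hck]; exact fun h => hck h.symm
    · rename_i hin
      have hck : ¬ (c == k) := by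
        intro hb
        exact hin ((pv_isIn_singleton c pvAlphabet).mpr (by simpa using (beq_iff_eq.mp hb) ▸ hk))
      rw [ih d]
      simp [hck]

lemma pv_main_eq (string : String) :
    get_most_common_letter string = get_most_common_letter_alt string := by
  have hk0 : (pvAlphabet.foldl (fun d ch => d.insert ch 0) (PySem.Dict.empty : PySem.Dict Char Int)).keys = pvAlphabet := by decide
  have hi0 : (pvAlphabet.foldl (fun d ch => d.insert ch 0) (PySem.Dict.empty : PySem.Dict Char Int)).items = pvAlphabet.map (fun k => (k, (0 : Int))) := by decide
  have hg0 : ∀ k ∈ pvAlphabet, (pvAlphabet.foldl (fun d ch => d.insert ch 0) (PySem.Dict.empty : PySem.Dict Char Int)).getD k 0 = 0 := by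
    intro k hk
    exact PySem.Dict.getD_of_get?_eq_some _ 0
      (PySem.Dict.get?_of_mem_items _ (by rw [hi0]; exact List.mem_map.mpr ⟨k, hk, rfl⟩) (by rw [hk0]; decide))
  have hi1 : ((PySem.Str.lower string).toList.foldl (fun d letter =>
        if PySem.Chars.isIn [letter] pvAlphabet then d.modify letter 0 (· + 1) else d)
        (pvAlphabet.foldl (fun d ch => d.insert ch 0) PySem.Dict.empty)).items
      = pvAlphabet.map (fun k => (k, ((PySem.Str.lower string).toList.count k : Int))) := by
    rw [pv_items_eq_keys_map _ (by rw [pv_keys_inv _ _ hk0]; decide), pv_keys_inv _ _ hk0]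
    apply List.map_congr_left
    intro k hk
    rw [pv_getD_inv _ _ _ hk, hg0 k hk, zero_add]
  simp only [get_most_common_letter, get_most_common_letter_alt, hi1, List.foldl_map,
    PySem.List.foldl_beq_add_one, zero_add]

-- ===== VERDICT (by name: the statement is the Claim_ definition above) =====
theorem get_most_common_letter_spec : Claim_equal_get_most_common_letter := by
  intro string _
  unfold Spec_get_most_common_letter
  exact pv_main_eq string
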